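-- pv_equiv track=rewrite | github.com/yona-projects/yona-install | install.py | permission
-- ===== SOURCE A (Python) =====
-- import stat
--
-- def permission(external_attr):
--     stat_ix = (4, 2, 1)
--
--     user_perm = 0
--     for mode_num, mode in zip(stat_ix, (stat.S_IRUSR, stat.S_IWUSR, stat.S_IXUSR)):
--         if (external_attr & mode) > 0:
--             user_perm += mode_num
--
--     grp_perm = 0
--     for mode_num, mode in zip(stat_ix, (stat.S_IRGRP, stat.S_IWGRP, stat.S_IXGRP)):
--         if (external_attr & mode) > 0:
--             grp_perm += mode_num
--
--     oth_perm = 0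
--     for mode_num, mode in zip(stat_ix, (stat.S_IROTH, stat.S_IWOTH, stat.S_IXOTH)):
--         if (external_attr & mode) > 0:
--             oth_perm += mode_num
--
--     return int('0o{0}{1}{2}'.format(user_perm, grp_perm, oth_perm), 8)
-- ===== SOURCE B (Python) =====
-- def permission(external_attr):
--     # The three loops of A just reassemble the low 9 permission bits as
--     # three octal digits; that is exactly the low 9 bits of external_attr.
--     return external_attr & 0o777
-- ===== Notes on version B (the rewrite author's own statement) =====
-- stated objective: simpler
-- what changed: Replaced the three bit-testing loops, the per-class digit sums and the octal string formatting/parsing by the single closed-form bitmask external_attr & 0o777.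
import Mathlib
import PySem

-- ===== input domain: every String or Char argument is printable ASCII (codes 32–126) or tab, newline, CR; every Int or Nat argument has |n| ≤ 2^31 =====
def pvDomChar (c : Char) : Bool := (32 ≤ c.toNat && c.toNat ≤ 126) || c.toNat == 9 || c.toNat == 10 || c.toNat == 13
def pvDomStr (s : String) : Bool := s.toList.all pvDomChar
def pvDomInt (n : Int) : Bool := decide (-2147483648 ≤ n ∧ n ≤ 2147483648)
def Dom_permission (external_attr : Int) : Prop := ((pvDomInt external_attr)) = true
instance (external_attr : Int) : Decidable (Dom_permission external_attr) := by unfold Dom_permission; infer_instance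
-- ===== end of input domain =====

-- B replaces A's three bit-testing loops and octal string round-trip with the
-- single closed-form bitmask external_attr & 0o777 (simpler; same value everywhere).


-- ===== PORT A =====
-- one permission class: fold over zip(stat_ix, modes), adding mode_num when the bit is set
def permClass (external_attr : Int) (modes : List Int) : Int :=
  (([4, 2, 1] : List Int).zip modes).foldl
    (fun acc p => if PySem.Int.band external_attr p.2 > 0 then acc + p.1 else acc) 0

def permission (external_attr : Int) : Int :=
  let userPerm := permClass external_attr [256, 128, 64]   -- S_IRUSR, S_IWUSR, S_IXUSR
  let grpPerm  := permClass external_attr [32, 16, 8]      -- S_IRGRP, S_IWGRP, S_IXGRP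
  let othPerm  := permClass external_attr [4, 2, 1]        -- S_IROTH, S_IWOTH, S_IXOTH
  -- int('0o{u}{g}{o}'.format(...), 8): each digit is in 0..7, so the octal
  -- string round-trip is exactly this arithmetic (hand port, exact here)
  64 * userPerm + 8 * grpPerm + othPerm

-- ===== PORT B =====
def permission_alt (external_attr : Int) : Int := PySem.Int.band external_attr 511

-- ===== PRECONDITION & SPEC =====
def Spec_permission (external_attr : Int) (out : Int) : Prop := out = permission_alt external_attr
instance (external_attr : Int) (out : Int) : Decidable (Spec_permission external_attr out) := by unfold Spec_permission; infer_instance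

-- ===== CLAIM (what is proved, stated in full; the proofs are below) =====
def Claim_equal_permission : Prop := ∀ (external_attr : Int), Dom_permission external_attr → Spec_permission external_attr (permission external_attr)

-- ===== LEMMAS AND PROOFS =====

-- a low mask (< 512) commutes with % 512 on Nat
theorem mask_mod (a c : Nat) (hc : c < 512) : (a % 512) &&& c = a &&& c := by
  apply Nat.eq_of_testBit_eq
  intro i
  rcases lt_or_ge i 9 with h | h
  · have : (a % 512).testBit i = a.testBit i := by
      have := Nat.testBit_mod_two_pow a 9 i
      simpa [show (512:Nat) = 2^9 from rfl, h] using this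
    simp [Nat.testBit_and, this]
  · have hcb : c.testBit i = false :=
      Nat.testBit_lt_two_pow (lt_of_lt_of_le hc (by
        calc (512:Nat) = 2^9 := rfl
        _ ≤ 2^i := Nat.pow_le_pow_right (by norm_num) h))
    simp [Nat.testBit_and, hcb]

-- complement fact for the masks actually used, checked exhaustively
set_option maxHeartbeats 4000000 in
set_option maxRecDepth 100000 in
theorem comp_fact : ∀ r : Fin 512, ∀ c ∈ [1,2,4,8,16,32,64,128,256,511],
    c - (c &&& (r : Nat)) = (511 - (r : Nat)) &&& c := by decide

-- band with any of the used masks only depends on n % 512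
theorem band_low (n : Int) (c : Nat) (hmem : c ∈ [1,2,4,8,16,32,64,128,256,511]) :
    PySem.Int.band n (c : Int) = PySem.Int.band (n % 512) (c : Int) := by
  have hc : c < 512 := by fin_cases hmem <;> omega
  have hcn : (0 : Int) ≤ (c : Int) := Int.natCast_nonneg c
  have hr : 0 ≤ n % 512 ∧ n % 512 < 512 := ⟨Int.emod_nonneg n (by norm_num), by omega⟩
  rcases le_or_gt 0 n with hn | hn
  · have h1 : (n % 512).toNat = n.toNat % 512 := by omega
    simp only [PySem.Int.band, if_pos hn, if_pos hcn, if_pos hr.1, Int.toNat_natCast, h1]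
    rw [mask_mod _ _ hc]
  · have hnn : ¬ (0 : Int) ≤ n := by omega
    simp only [PySem.Int.band, if_neg hnn, if_pos hcn, if_pos hr.1, Int.toNat_natCast]
    -- LHS: c - (c &&& m) with m = (-n-1).toNat;  RHS: (n % 512).toNat &&& c
    set m : Nat := (-n - 1).toNat with hm
    have h2 : (n % 512).toNat = 511 - m % 512 := by omega
    have h3 : c &&& m = c &&& (m % 512) := by
      rw [Nat.and_comm c m, Nat.and_comm c (m % 512), mask_mod _ _ hc]
    have h4 := comp_fact ⟨m % 512, by omega⟩ c hmem
    simp only [h2, h3]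
    simpa using h4

-- permission only depends on n % 512
theorem permission_mod (n : Int) : permission n = permission (n % 512) := by
  simp only [permission, permClass, List.zip, List.zipWith, List.foldl]
  rw [show (256 : Int) = ((256 : Nat) : Int) from rfl, band_low n 256 (by decide)]
  rw [show (128 : Int) = ((128 : Nat) : Int) from rfl, band_low n 128 (by decide)]
  rw [show (64 : Int) = ((64 : Nat) : Int) from rfl, band_low n 64 (by decide)]
  rw [show (32 : Int) = ((32 : Nat) : Int) from rfl, band_low n 32 (by decide)]
  rw [show (16 : Int) = ((16 : Nat) : Int) from rfl, band_low n 16 (by decide)]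
  rw [show (8 : Int) = ((8 : Nat) : Int) from rfl, band_low n 8 (by decide)]
  rw [show (4 : Int) = ((4 : Nat) : Int) from rfl, band_low n 4 (by decide)]
  rw [show (2 : Int) = ((2 : Nat) : Int) from rfl, band_low n 2 (by decide)]
  rw [show (1 : Int) = ((1 : Nat) : Int) from rfl, band_low n 1 (by decide)]

theorem permission_alt_mod (n : Int) : permission_alt n = permission_alt (n % 512) := by
  simp only [permission_alt]
  rw [show (511 : Int) = ((511 : Nat) : Int) from rfl, band_low n 511 (by decide)]

set_option maxHeartbeats 4000000 in
set_option maxRecDepth 100000 in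
theorem small_case : ∀ m : Fin 512, permission ((m : Nat) : Int) = permission_alt ((m : Nat) : Int) := by
  decide

-- ===== VERDICT (by name: the statement is the Claim_ definition above) =====
theorem permission_spec : Claim_equal_permission := by
  intro n _
  unfold Spec_permission
  rw [permission_mod n, permission_alt_mod n]
  have hr : 0 ≤ n % 512 ∧ n % 512 < 512 := ⟨Int.emod_nonneg n (by norm_num), by omega⟩
  have h := small_case ⟨(n % 512).toNat, by omega⟩
  simpa [show (((n % 512).toNat : Nat) : Int) = n % 512 by omega] using h
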